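-- pv_equiv track=rewrite | github.com/mtripp100/guid-rename | src/guid_rename/blocks.py | as_blocks
-- ===== SOURCE A (Python) =====
-- def as_blocks(work, num_workers):
--     if num_workers < 1:
--         raise ValueError("num_workers must be > 0")
--
--     min_size = len(work) // num_workers
--     extra = len(work) % num_workers
--
--     start = 0
--     for _ in range(num_workers):
--         end = min_size + (1 if extra > 0 else 0)
--         yield work[start : start + end]
--         start += end
--
--         if extra > 0:
--             extra -= 1
-- ===== SOURCE B (Python) =====
-- def as_blocks(work, num_workers):
--     if num_workers < 1:
--         raise ValueError("num_workers must be > 0")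
--
--     q, r = divmod(len(work), num_workers)
--     it = iter(work)
--     for size in [q + 1] * r + [q] * (num_workers - r):
--         yield [next(it) for _ in range(size)]
-- ===== Notes on version B (the rewrite author's own statement) =====
-- stated objective: alternative
-- what changed: B works in two stages: it first builds the list of block sizes [q+1]*r + [q]*(k-r) from one divmod, then fills each block by consuming a single iterator over the sequence, instead of A's one loop with a running start cursor, slicing, and a decrementing extra counter.
-- outside the precondition, e.g. on as_blocks([1, 2], 0): A raises ValueError, B raises ValueError
import Mathlib
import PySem

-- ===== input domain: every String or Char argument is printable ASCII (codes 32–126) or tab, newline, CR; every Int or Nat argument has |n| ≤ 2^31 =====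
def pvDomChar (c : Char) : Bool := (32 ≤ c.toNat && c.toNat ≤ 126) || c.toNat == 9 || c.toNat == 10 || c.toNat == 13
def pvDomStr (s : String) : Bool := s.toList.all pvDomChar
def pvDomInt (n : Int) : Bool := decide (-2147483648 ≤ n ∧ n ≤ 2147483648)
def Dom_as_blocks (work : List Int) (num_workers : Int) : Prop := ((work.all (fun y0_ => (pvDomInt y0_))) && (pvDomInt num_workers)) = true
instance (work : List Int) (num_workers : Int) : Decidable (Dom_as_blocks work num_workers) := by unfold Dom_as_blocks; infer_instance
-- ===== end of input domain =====

-- B works in two stages: it builds the list of block sizes [q+1]*r + [q]*(k-r) from one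
-- divmod, then fills each block by consuming a single iterator over the sequence, instead
-- of A's loop with a running cursor, slicing and a decrementing extra counter
-- (objective: alternative decomposition; equivalence is about the list of yielded blocks).

-- ===== PORT A =====
-- A's 'for _ in range(num_workers)' loop over the state (start, extra), step for step.
def as_blocks_loop (work : List Int) (min_size : Int) : Nat → Int → Int → List (List Int)
  | 0, _, _ => []
  | n + 1, start, extra =>
    let e := min_size + (if extra > 0 then 1 else 0)
    PySem.List.slice work (some start) (some (start + e)) ::
      as_blocks_loop work min_size n (start + e) (if extra > 0 then extra - 1 else extra)

def as_blocks (work : List Int) (num_workers : Int) : List (List Int) :=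
  if num_workers < 1 then []  -- Python raises ValueError here; excluded by Pre_
  else
    as_blocks_loop work (PySem.Int.floordiv work.length num_workers)
      num_workers.toNat 0 (PySem.Int.mod work.length num_workers)

-- ===== PORT B =====
-- the 'for size in sizes: yield [next(it) for _ in range(size)]' loop: the iterator's
-- remaining elements are the state; 'range(size)' iterates size.toNat times.
def as_blocks_fill (rest : List Int) : List Int → List (List Int)
  | [] => []
  | s :: ss => rest.take s.toNat :: as_blocks_fill (rest.drop s.toNat) ss

def as_blocks_alt (work : List Int) (num_workers : Int) : List (List Int) :=
  if num_workers < 1 then []  -- Python raises ValueError here; excluded by Pre_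
  else
    let q := PySem.Int.floordiv work.length num_workers
    let r := PySem.Int.mod work.length num_workers
    as_blocks_fill work
      (List.replicate r.toNat (q + 1) ++ List.replicate (num_workers - r).toNat q)

-- ===== PRECONDITION & SPEC =====
-- Pre_ excludes num_workers < 1, where the Python A raises ValueError on first iteration.
def Pre_as_blocks (work : List Int) (num_workers : Int) : Prop := 1 ≤ num_workers
instance (work : List Int) (num_workers : Int) : Decidable (Pre_as_blocks work num_workers) := by unfold Pre_as_blocks; infer_instance
def pvWitness_as_blocks : List Int × Int := ([1, 2, 3, 4, 5], 3)

def Spec_as_blocks (work : List Int) (num_workers : Int) (out : List (List Int)) : Prop := out = as_blocks_alt work num_workers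
instance (work : List Int) (num_workers : Int) (out : List (List Int)) : Decidable (Spec_as_blocks work num_workers out) := by unfold Spec_as_blocks; infer_instance

-- ===== CLAIM (what is proved, stated in full; the proofs are below) =====
def Claim_equal_as_blocks : Prop := ∀ (work : List Int) (num_workers : Int), Dom_as_blocks work num_workers → Pre_as_blocks work num_workers → Spec_as_blocks work num_workers (as_blocks work num_workers)

-- ===== LEMMAS AND PROOFS =====

-- Common normal form: the k balanced contiguous blocks of work, in Nat take/drop arithmetic.
def blocksN (work : List Int) (k : Nat) : List (List Int) :=
  (List.range k).map (fun j =>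
    (work.drop (j * (work.length / k) + min j (work.length % k))).take
      (work.length / k + (if j < work.length % k then 1 else 0)))

-- A's loop state at iteration i is given by the closed forms
-- start = i*m + min i e, extra = max (e - i) 0.
lemma as_blocks_loop_eq (work : List Int) (m e : Int) (_he : 0 ≤ e) :
    ∀ (n i : Nat),
      as_blocks_loop work m n ((i : Int) * m + min (i : Int) e) (max (e - (i : Int)) 0) =
        (List.range n).map (fun j =>
          let start := ((i + j : Nat) : Int) * m + min ((i + j : Nat) : Int) e
          PySem.List.slice work (some start)
            (some (start + m + (if ((i + j : Nat) : Int) < e then 1 else 0)))) := by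
  intro n
  induction n with
  | zero => intro i; simp [as_blocks_loop]
  | succ n ih =>
    intro i
    rw [List.range_succ_eq_map]
    simp only [as_blocks_loop, List.map_cons, List.map_map, Nat.add_zero]
    have hc : (max (e - (i : Int)) 0 > 0) = ((i : Int) < e) := by
      simp only [eq_iff_iff]; omega
    simp only [hc]
    congr 1
    · simp only [add_assoc]
    · have hstart : (i : Int) * m + min (i : Int) e +
          (m + (if (i : Int) < e then 1 else 0)) =
          ((i + 1 : Nat) : Int) * m + min ((i + 1 : Nat) : Int) e := by
        push_cast; split_ifs <;> (ring_nf; omega)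
      have hextra : (if (i : Int) < e then max (e - (i : Int)) 0 - 1
          else max (e - (i : Int)) 0) = max (e - ((i + 1 : Nat) : Int)) 0 := by
        push_cast; split_ifs <;> omega
      rw [hstart, hextra, ih (i + 1)]
      apply List.map_congr_left
      intro j _
      have h' : i + 1 + j = i + (j + 1) := by omega
      simp only [Function.comp, Nat.succ_eq_add_one, h']

-- A equals the normal form.
lemma as_blocks_eq_blocksN (work : List Int) (k : Int) (hk : 1 ≤ k) :
    as_blocks work k = blocksN work k.toNat := by
  obtain ⟨k', rfl⟩ : ∃ k' : Nat, k = (k' : Int) := ⟨k.toNat, by omega⟩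
  unfold as_blocks
  have hnw : ¬ (k' : Int) < 1 := not_lt.mpr hk
  simp only [hnw, if_false, Int.toNat_natCast]
  set q := work.length / k' with hq
  set r := work.length % k' with hr
  have hm : PySem.Int.floordiv ((work.length : Nat) : Int) ((k' : Nat) : Int) = ((q : Nat) : Int) := by
    rw [PySem.Int.floordiv_natCast]
  have hmo : PySem.Int.mod ((work.length : Nat) : Int) ((k' : Nat) : Int) = ((r : Nat) : Int) := by
    rw [PySem.Int.mod_natCast]
  rw [hm, hmo]
  have h0 := as_blocks_loop_eq work ((q : Nat) : Int) ((r : Nat) : Int) (by positivity) k' 0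
  simp only [Nat.cast_zero, zero_mul, zero_add,
    min_eq_left (by positivity : (0:Int) ≤ ((r : Nat) : Int)), sub_zero,
    max_eq_left (by positivity : (0:Int) ≤ ((r : Nat) : Int))] at h0
  rw [h0]
  unfold blocksN
  apply List.map_congr_left
  intro j _
  have h1 : (j : Int) * ((q : Nat) : Int) + min (j : Int) ((r : Nat) : Int)
      = (((j * q + min j r : Nat)) : Int) := by push_cast; ring
  have h2 : (((j * q + min j r : Nat)) : Int) + ((q : Nat) : Int)
        + (if (j : Int) < ((r : Nat) : Int) then (1:Int) else 0)
      = (((j * q + min j r : Nat)) : Int) + (((q + if j < r then 1 else 0) : Nat) : Int) := by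
    by_cases hjr : j < r
    · have hc : (j : Int) < ((r : Nat) : Int) := by exact_mod_cast hjr
      simp only [hjr, hc, if_true]
      push_cast
      ring
    · have hc : ¬ (j : Int) < ((r : Nat) : Int) := by exact_mod_cast hjr
      simp only [hjr, hc, if_false]
      push_cast
      ring
  rw [h1, h2, PySem.List.slice_natCast_add]

-- Filling blocks of sizes [q+1]*a ++ [q]*b from the iterator, in closed form.
lemma as_blocks_fill_eq (q : Nat) : ∀ (a b : Nat) (xs : List Int),
    as_blocks_fill xs
        (List.replicate a (((q : Nat) : Int) + 1) ++ List.replicate b ((q : Nat) : Int)) =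
      (List.range (a + b)).map (fun j =>
        (xs.drop (j * q + min j a)).take (q + if j < a then 1 else 0)) := by
  intro a
  induction a with
  | zero =>
    intro b
    induction b with
    | zero => intro xs; simp [as_blocks_fill]
    | succ b ihb =>
      intro xs
      simp only [List.replicate_zero, List.nil_append, List.replicate_succ, Nat.zero_add,
        as_blocks_fill, Int.toNat_natCast] at ihb ⊢
      rw [List.range_succ_eq_map, List.map_cons, List.map_map]
      congr 1
      · simp
      · rw [ihb (xs.drop q)]
        apply List.map_congr_left
        intro j _
        simp only [Function.comp]
        rw [List.drop_drop]
        congr 2 <;>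
          first
            | (rw [Nat.succ_mul]; generalize j * q = T; omega)
            | (split_ifs <;> omega)
            | omega
  | succ a iha =>
    intro b xs
    simp only [List.replicate_succ, List.cons_append, as_blocks_fill]
    rw [show (((q : Nat) : Int) + 1).toNat = q + 1 by omega]
    rw [show a + 1 + b = (a + b) + 1 by omega, List.range_succ_eq_map, List.map_cons,
      List.map_map]
    congr 1
    · simp
    · rw [iha b (xs.drop (q + 1))]
      apply List.map_congr_left
      intro j _
      simp only [Function.comp]
      rw [List.drop_drop]
      congr 2 <;>
        first
          | (rw [Nat.succ_mul]; generalize j * q = T; omega)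
          | (split_ifs <;> omega)
          | omega

-- B equals the normal form.
lemma alt_eq_blocksN (work : List Int) (k : Int) (hk : 1 ≤ k) :
    as_blocks_alt work k = blocksN work k.toNat := by
  obtain ⟨k', rfl⟩ : ∃ k' : Nat, k = (k' : Int) := ⟨k.toNat, by omega⟩
  have hk1 : 1 ≤ k' := by exact_mod_cast hk
  unfold as_blocks_alt
  have hnw : ¬ (k' : Int) < 1 := not_lt.mpr hk
  simp only [hnw, if_false, Int.toNat_natCast]
  set q := work.length / k' with hq
  set r := work.length % k' with hr
  have hm : PySem.Int.floordiv ((work.length : Nat) : Int) ((k' : Nat) : Int) = ((q : Nat) : Int) := by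
    rw [PySem.Int.floordiv_natCast]
  have hmo : PySem.Int.mod ((work.length : Nat) : Int) ((k' : Nat) : Int) = ((r : Nat) : Int) := by
    rw [PySem.Int.mod_natCast]
  rw [hm, hmo, Int.toNat_natCast]
  have hrk : r < k' := by
    rw [hr]
    exact Nat.mod_lt _ (by omega)
  rw [show ((k' : Int) - ((r : Nat) : Int)).toNat = k' - r by omega]
  rw [as_blocks_fill_eq q r (k' - r) work]
  unfold blocksN
  rw [show r + (k' - r) = k' by omega]

theorem as_blocks_spec : Claim_equal_as_blocks := by
  intro work num_workers _ hpre
  have h1 : 1 ≤ num_workers := hpre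
  unfold Spec_as_blocks
  rw [as_blocks_eq_blocksN work num_workers h1, alt_eq_blocksN work num_workers h1]
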